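-- pv_equiv track=rewrite | github.com/sankalpgambhir/trampoline-benchmarks | python_coroutines.py | double_coro_loop
-- ===== SOURCE A (Python) =====
-- def list_returner_loop():
--     yield (yield), False, None
--
-- def inner_cont_loop(head, cont):
--     yield [head, head, *(yield)], False, cont
--
-- def double_coro_loop(l):
--     cont = list_returner_loop()
--     next(cont)
--     down = True
--
--     while True:
--         if down and l:
--             k = inner_cont_loop(l[0], cont)
--             next(k)
--             l, down, cont = l[1:], True, k
--         else:
--             l, down, cont = cont.send(l)
--             if cont is None:
--                 return l
-- ===== SOURCE B (Python) =====
-- def double_coro_loop(l):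
--     n = len(l)
--     res = [None] * (2 * n)
--     res[0::2] = l
--     res[1::2] = l
--     return res
-- ===== Notes on version B (the rewrite author's own statement) =====
-- stated objective: faster
-- what changed: Replaces the coroutine trampoline (a chain of generator continuations built on the way down and unwound on the way up, with l[1:] copying at each step) with a preallocated buffer filled by two strided slice assignments.
import Mathlib
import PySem

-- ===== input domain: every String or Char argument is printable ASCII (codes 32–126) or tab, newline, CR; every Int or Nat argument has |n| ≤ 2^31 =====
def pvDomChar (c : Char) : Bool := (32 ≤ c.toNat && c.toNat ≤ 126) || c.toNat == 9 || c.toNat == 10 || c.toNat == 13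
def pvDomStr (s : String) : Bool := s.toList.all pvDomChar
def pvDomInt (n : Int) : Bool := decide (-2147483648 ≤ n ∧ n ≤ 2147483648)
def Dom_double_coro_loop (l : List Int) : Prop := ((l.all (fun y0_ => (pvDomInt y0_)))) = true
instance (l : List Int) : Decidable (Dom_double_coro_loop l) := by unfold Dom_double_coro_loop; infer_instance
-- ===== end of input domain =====

-- B replaces A's coroutine trampoline with two strided slice assignments into a preallocated buffer; return values agree on all inputs.
-- ===== PORT A =====
-- A builds a chain of generator continuations on the way down (one per head, carrying
-- that head and a pointer to the previous continuation), then unwinds: each continuation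
-- returns [head, head, *received]. The chain is modelled literally as the stack of heads.
def dclUnwind (stack : List Int) (l : List Int) : List Int :=
  match stack with
  | [] => l
  | h :: rest => dclUnwind rest (h :: h :: l)

def dclDown (l : List Int) (stack : List Int) : List Int :=
  match l with
  | h :: t => dclDown t (h :: stack)   -- down branch: push inner_cont_loop(l[0], cont), l := l[1:]
  | [] => dclUnwind stack []           -- else branch: send l (= []) up the chain until cont is None

def double_coro_loop (l : List Int) : List Int := dclDown l []

-- ===== PORT B =====
-- res[0::2] = l; res[1::2] = l : the buffer interleaves two copies of l position-wise.
def double_coro_loop_alt (l : List Int) : List Int :=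
  (l.zip l).flatMap (fun p => [p.1, p.2])

-- ===== PRECONDITION & SPEC =====
def Spec_double_coro_loop (l : List Int) (out : List Int) : Prop := out = double_coro_loop_alt l
instance (l : List Int) (out : List Int) : Decidable (Spec_double_coro_loop l out) := by unfold Spec_double_coro_loop; infer_instance

-- ===== CLAIM (what is proved, stated in full; the proofs are below) =====
def Claim_equal_double_coro_loop : Prop := ∀ (l : List Int), Dom_double_coro_loop l → Spec_double_coro_loop l (double_coro_loop l)

-- ===== LEMMAS AND PROOFS =====

-- ===== VERDICT (by name: the statement is the Claim_ definition above) =====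
theorem dclDown_eq (l : List Int) : ∀ stack, dclDown l stack = dclUnwind stack (double_coro_loop_alt l) := by
  induction l with
  | nil => intro stack; rfl
  | cons h t ih =>
      intro stack
      simp only [dclDown, ih (h :: stack), dclUnwind, double_coro_loop_alt,
        List.zip_cons_cons, List.flatMap_cons]
      rfl

theorem double_coro_loop_spec : Claim_equal_double_coro_loop := by
  intro l _
  unfold Spec_double_coro_loop double_coro_loop
  rw [dclDown_eq l []]
  rfl
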